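-- pv_equiv track=rewrite | github.com/minhtribk12/code-review-ai | src/code_review_agent/interactive/commands/pr_workflow.py | _parse_limit
-- ===== SOURCE A (Python) =====
-- def _parse_limit(args: list[str], default: int = 30) -> tuple[list[str], int]:
--     """Parse --limit flag from args. Returns (remaining_args, limit)."""
--     remaining: list[str] = []
--     limit = default
--     i = 0
--     while i < len(args):
--         if args[i] == "--limit" and i + 1 < len(args):
--             try:
--                 limit = int(args[i + 1])
--             except ValueError:
--                 limit = default
--             i += 2
--         else:
--             remaining.append(args[i])
--             i += 1
--     return remaining, limit
-- ===== SOURCE B (Python) =====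
-- def _parse_limit(args: list[str], default: int = 30) -> tuple[list[str], int]:
--     """Parse --limit flag from args. Returns (remaining_args, limit)."""
--     remaining: list[str] = []
--     limit = default
--     expect_value = False
--     for token in args:
--         if expect_value:
--             try:
--                 limit = int(token)
--             except ValueError:
--                 limit = default
--             expect_value = False
--         elif token == "--limit":
--             expect_value = True
--         else:
--             remaining.append(token)
--     if expect_value:
--         remaining.append("--limit")
--     return remaining, limit
-- ===== Notes on version B (the rewrite author's own statement) =====
-- stated objective: alternative
-- what changed: Replaces the index-based while loop with two-token lookahead by a single for-each state machine carrying an expect_value flag (trailing '--limit' handled after the loop), avoiding per-iteration index arithmetic and len() calls.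
import Mathlib
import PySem

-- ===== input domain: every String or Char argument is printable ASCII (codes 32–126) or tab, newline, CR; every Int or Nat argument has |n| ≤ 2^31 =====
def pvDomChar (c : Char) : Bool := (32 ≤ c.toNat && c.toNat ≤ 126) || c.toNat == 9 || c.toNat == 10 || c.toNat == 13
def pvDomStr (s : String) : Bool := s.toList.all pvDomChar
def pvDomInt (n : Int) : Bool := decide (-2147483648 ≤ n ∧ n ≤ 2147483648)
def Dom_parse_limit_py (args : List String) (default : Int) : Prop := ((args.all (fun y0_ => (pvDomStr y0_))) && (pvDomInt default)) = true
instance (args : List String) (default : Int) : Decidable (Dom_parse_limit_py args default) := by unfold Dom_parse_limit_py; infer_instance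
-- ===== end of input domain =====

-- B replaces A's index-based while loop with lookahead by a for-each state machine with an
-- expect_value flag (an alternative decomposition of the same O(n) pass; return value only).

-- ===== PORT A =====
-- while loop over index i: consume "--limit" together with its following token when present
def parse_limit_loopA (default : Int) : List String → List String → Int → List String × Int
  | [], remaining, limit => (remaining, limit)
  | [x], remaining, limit => (remaining ++ [x], limit)  -- i+1 < len(args) is false
  | x :: y :: rest, remaining, limit =>
    if x == "--limit" then
      parse_limit_loopA default rest remaining
        (match PySem.Int.ofStr? y with | some v => v | none => default)  -- try int / except ValueError
    else
      parse_limit_loopA default (y :: rest) (remaining ++ [x]) limit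

def parse_limit_py (args : List String) (default : Int) : List String × Int :=
  parse_limit_loopA default args [] default

-- ===== PORT B =====
-- one step of the for-each state machine: (remaining, limit, expect_value)
def parse_limit_stepB (default : Int) (st : List String × Int × Bool) (token : String) :
    List String × Int × Bool :=
  if st.2.2 then
    (st.1, (match PySem.Int.ofStr? token with | some v => v | none => default), false)
  else if token == "--limit" then
    (st.1, st.2.1, true)
  else
    (st.1 ++ [token], st.2.1, false)

def parse_limit_py_alt (args : List String) (default : Int) : List String × Int :=
  let s := args.foldl (parse_limit_stepB default) ([], default, false)
  if s.2.2 then (s.1 ++ ["--limit"], s.2.1) else (s.1, s.2.1)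

-- ===== PRECONDITION & SPEC =====
def Spec_parse_limit_py (args : List String) (default : Int) (out : List String × Int) : Prop := out = parse_limit_py_alt args default
instance (args : List String) (default : Int) (out : List String × Int) : Decidable (Spec_parse_limit_py args default out) := by unfold Spec_parse_limit_py; infer_instance

-- ===== CLAIM (what is proved, stated in full; the proofs are below) =====
def Claim_equal_parse_limit_py : Prop := ∀ (args : List String) (default : Int), Dom_parse_limit_py args default → Spec_parse_limit_py args default (parse_limit_py args default)

-- ===== LEMMAS AND PROOFS =====
theorem parse_limit_fold_loop (default : Int) :
    ∀ (l remaining : List String) (limit : Int),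
      (let s := l.foldl (parse_limit_stepB default) (remaining, limit, false)
       if s.2.2 then (s.1 ++ ["--limit"], s.2.1) else (s.1, s.2.1))
      = parse_limit_loopA default l remaining limit
  | [], remaining, limit => by simp [parse_limit_loopA]
  | [x], remaining, limit => by
      by_cases h : x = "--limit" <;>
        simp [parse_limit_loopA, parse_limit_stepB, h]
  | x :: y :: rest, remaining, limit => by
      by_cases h : x = "--limit"
      · simpa [parse_limit_stepB, parse_limit_loopA, h] using
          parse_limit_fold_loop default rest remaining
            (match PySem.Int.ofStr? y with | some v => v | none => default)
      · simpa [parse_limit_stepB, parse_limit_loopA, h] using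
          parse_limit_fold_loop default (y :: rest) (remaining ++ [x]) limit

-- ===== VERDICT (by name: the statement is the Claim_ definition above) =====
theorem parse_limit_py_spec : Claim_equal_parse_limit_py := by
  intro args default _
  unfold Spec_parse_limit_py parse_limit_py parse_limit_py_alt
  exact (parse_limit_fold_loop default args [] default).symm
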